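-- pv_equiv track=rewrite | github.com/vsatyaparsad/Hivetosnowflake | process_batch.py | _get_sql_context
-- ===== SOURCE A (Python) =====
-- from typing import Dict, List, Optional
--
-- def _get_sql_context(sql: str, error_position: Optional[int], context_lines: int = 3) -> str:
--     """Get SQL context around error position"""
--     if not error_position:
--         return ""
--
--     lines = sql.split('\n')
--     total_pos = 0
--     error_line = 0
--
--     # Find the line containing the error
--     for i, line in enumerate(lines):
--         total_pos += len(line) + 1  # +1 for newline
--         if total_pos >= error_position:
--             error_line = i
--             break
--
--     # Get context lines
--     start_line = max(0, error_line - context_lines)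
--     end_line = min(len(lines), error_line + context_lines + 1)
--
--     # Build context string
--     context = []
--     for i in range(start_line, end_line):
--         prefix = "  "
--         if i == error_line:
--             prefix = "→ "  # Arrow pointing to error line
--         context.append(f"{prefix}{i+1:4d} | {lines[i]}")
--
--         # Add error position marker
--         if i == error_line:
--             pos_in_line = error_position - sum(len(l) + 1 for l in lines[:i])
--             context.append("       " + " " * pos_in_line + "^")
--
--     return "\n".join(context)
-- ===== SOURCE B (Python) =====
-- # B: prefix-sum array + recursive binary search for the error line (instead of A's
-- # linear scan with a running total and a recomputed sum); the context window is a
-- # comprehension with the marker row inserted afterwards. A position beyond the end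
-- # of the text is clamped to the last line.
-- def _lower_bound(cum, target, lo, hi):
--     """Least index i in [lo, hi) with cum[i] >= target, else hi (cum sorted)."""
--     if lo >= hi:
--         return lo
--     mid = (lo + hi) // 2
--     if cum[mid] < target:
--         return _lower_bound(cum, target, mid + 1, hi)
--     return _lower_bound(cum, target, lo, mid)
--
--
-- def _get_sql_context(sql, error_position, context_lines=3):
--     if not error_position:
--         return ""
--
--     lines = sql.split('\n')
--
--     # prefix sums: cum[i] = sum of len(line)+1 over lines[0..i]
--     cum = []
--     t = 0
--     for ln in lines:
--         t += len(ln) + 1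
--         cum.append(t)
--
--     error_line = min(_lower_bound(cum, error_position, 0, len(cum)), len(lines) - 1)
--
--     start_line = max(0, error_line - context_lines)
--     end_line = min(len(lines), error_line + context_lines + 1)
--
--     rows = [("→ " if i == error_line else "  ") + "%4d | %s" % (i + 1, lines[i])
--             for i in range(start_line, end_line)]
--
--     if start_line <= error_line < end_line:
--         pos_in_line = error_position - (cum[error_line - 1] if error_line > 0 else 0)
--         rows.insert(error_line - start_line + 1, "       " + " " * pos_in_line + "^")
--
--     return "\n".join(rows)
-- ===== Notes on version B (the rewrite author's own statement) =====
-- stated objective: alternative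
-- what changed: The error line is found by binary search over a precomputed prefix-sum array (reused for the marker offset) instead of A's linear scan with a running total plus a recomputed sum, and the context window is built as one comprehension with the marker row inserted afterwards instead of being appended inside the loop.
-- intended difference: On multi-line SQL with a non-negative context_lines and an error_position past the end of the text, A's scan never breaks and accidentally points the arrow and marker at the FIRST line, while B clamps the position to the LAST line, which is the intended place to point for an overshooting position. — e.g. on _get_sql_context("a\nb", some 9, 3): A returns "→ 1 | a\n ^\n 2 | b", B returns " 1 | a\n→ 2 | b\n ^"
import Mathlib
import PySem

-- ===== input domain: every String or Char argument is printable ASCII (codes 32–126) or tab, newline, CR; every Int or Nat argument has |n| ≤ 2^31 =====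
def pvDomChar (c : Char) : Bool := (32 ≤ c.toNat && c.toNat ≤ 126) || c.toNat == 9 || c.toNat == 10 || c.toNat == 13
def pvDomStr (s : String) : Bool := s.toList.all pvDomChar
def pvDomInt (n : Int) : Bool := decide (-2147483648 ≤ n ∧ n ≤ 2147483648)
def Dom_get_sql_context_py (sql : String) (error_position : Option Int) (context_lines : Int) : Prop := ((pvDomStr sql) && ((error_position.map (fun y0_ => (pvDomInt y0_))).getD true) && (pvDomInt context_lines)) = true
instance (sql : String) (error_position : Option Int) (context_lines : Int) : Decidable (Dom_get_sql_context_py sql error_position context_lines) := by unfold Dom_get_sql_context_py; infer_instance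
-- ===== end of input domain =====

-- B replaces A's linear scan (running total, plus a recomputed prefix sum for the marker)
-- by a prefix-sum array queried with a recursive binary search, and builds the context
-- window as a list comprehension with the marker row inserted afterwards; an error
-- position past the end of the text is clamped to the last line (A accidentally points
-- at the first line there — stated as the intended difference D_ below).

-- ===== PORT A =====

-- f"{n:4d}" / "%4d" % n : decimal digits of n right-padded on the left with spaces to width 4
-- (exact: str(n) here is ASCII and f-string width counts characters)
def pvPad4 (n : Int) : List Char :=
  let s := PySem.Int.toChars n
  List.replicate (4 - s.length) ' ' ++ s

-- A's find loop: 'for i, line in enumerate(lines): total += len(line)+1; if total >= ep: error_line = i; break'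
-- (error_line defaults to 0 when the loop runs out)
def pvFindLine : List (Int × List Char) → Int → Int → Int
  | [], _, _ => 0
  | (i, line) :: rest, total, ep =>
      let total2 := total + (line.length : Int) + 1
      if total2 ≥ ep then i else pvFindLine rest total2 ep

def get_sql_context_py (sql : String) (error_position : Option Int) (context_lines : Int) : String :=
  match error_position with
  | none => ""
  | some ep =>
    if ep = 0 then "" else
      let lines := PySem.Chars.splitOn sql.toList ['\n']
      let error_line : Int := pvFindLine (PySem.List.enumerate lines 0) 0 ep
      let start_line := max 0 (error_line - context_lines)
      let end_line := min ((lines.length : Int)) (error_line + context_lines + 1)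
      let context := (PySem.List.pyRange start_line end_line 1).foldl (fun ctx i =>
        let pfx : List Char := if i = error_line then ['→', ' '] else [' ', ' ']
        let ctx2 := ctx ++ [pfx ++ pvPad4 (i + 1) ++ [' ', '|', ' '] ++ PySem.List.pyGetD lines i []]
        if i = error_line then
          let pos_in_line := ep - ((PySem.List.slice lines none (some i)).map (fun l => (l.length : Int) + 1)).sum
          ctx2 ++ [[' ',' ',' ',' ',' ',' ',' '] ++ PySem.List.pyRepeat [' '] pos_in_line ++ ['^']]
        else ctx2) []
      String.ofList (PySem.Chars.join ['\n'] context)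

-- ===== PORT B =====

-- B's recursive binary search: least index i in [lo, hi) with cum[i] >= target, else hi
-- (structural recursion on a fuel = hi - lo, so the kernel can evaluate it; the fuel
-- only totalizes the recursion, the branch structure is Source B's _lower_bound)
def pvLowerBoundGo : Nat → List Int → Int → Nat → Nat → Nat
  | 0, _, _, lo, _ => lo
  | fuel + 1, cum, target, lo, hi =>
    if lo ≥ hi then lo
    else
      let mid := (lo + hi) / 2
      if PySem.List.pyGetD cum (mid : Int) 0 < target then pvLowerBoundGo fuel cum target (mid + 1) hi
      else pvLowerBoundGo fuel cum target lo mid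

def pvLowerBound (cum : List Int) (target : Int) (lo hi : Nat) : Nat :=
  pvLowerBoundGo (hi - lo) cum target lo hi

def get_sql_context_py_alt (sql : String) (error_position : Option Int) (context_lines : Int) : String :=
  match error_position with
  | none => ""
  | some ep =>
    if ep = 0 then "" else
      let lines := PySem.Chars.splitOn sql.toList ['\n']
      let cum := (lines.foldl (fun (p : List Int × Int) ln =>
          let t := p.2 + (ln.length : Int) + 1
          (p.1 ++ [t], t)) ([], 0)).1
      let error_line : Nat := min (pvLowerBound cum ep 0 cum.length) (lines.length - 1)
      let start_line := max 0 ((error_line : Int) - context_lines)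
      let end_line := min ((lines.length : Int)) ((error_line : Int) + context_lines + 1)
      let rows := (PySem.List.pyRange start_line end_line 1).map (fun i =>
          (if i = (error_line : Int) then ['→', ' '] else [' ', ' ']) ++ pvPad4 (i + 1) ++ [' ', '|', ' '] ++ PySem.List.pyGetD lines i [])
      let rows2 := if start_line ≤ (error_line : Int) ∧ (error_line : Int) < end_line then
          let pos_in_line := ep - (if (error_line : Int) > 0 then PySem.List.pyGetD cum ((error_line : Int) - 1) 0 else 0)
          PySem.List.insert rows ((error_line : Int) - start_line + 1)
            ([' ',' ',' ',' ',' ',' ',' '] ++ PySem.List.pyRepeat [' '] pos_in_line ++ ['^'])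
        else rows
      String.ofList (PySem.Chars.join ['\n'] rows2)

-- ===== PRECONDITION & SPEC =====

-- On multi-line SQL with a non-negative context_lines and an error_position past the end of
-- the text, A's scan never breaks and accidentally points the arrow and marker at the FIRST
-- line, while B clamps to the LAST line, the intended place for an overshooting position.
def D_get_sql_context_py (sql : String) (error_position : Option Int) (context_lines : Int) : Prop :=
  '\n' ∈ sql.toList ∧ 0 ≤ context_lines ∧ (sql.toList.length : Int) + 1 < error_position.getD 0
instance (sql : String) (error_position : Option Int) (context_lines : Int) : Decidable (D_get_sql_context_py sql error_position context_lines) := by unfold D_get_sql_context_py; infer_instance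

def Spec_get_sql_context_py (sql : String) (error_position : Option Int) (context_lines : Int) (out : String) : Prop := ¬ D_get_sql_context_py sql error_position context_lines → out = get_sql_context_py_alt sql error_position context_lines
instance (sql : String) (error_position : Option Int) (context_lines : Int) (out : String) : Decidable (Spec_get_sql_context_py sql error_position context_lines out) := by unfold Spec_get_sql_context_py; infer_instance

def pvDiffWitness_get_sql_context_py : String × Option Int × Int := ("a\nb", some 9, 3)
def pvDiffWitnessOut_get_sql_context_py : String × String :=
  ("→    1 | a\n                ^\n     2 | b", "     1 | a\n→    2 | b\n              ^")

-- ===== CLAIM (what is proved, stated in full; the proofs are below) =====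
def Claim_unchanged_get_sql_context_py : Prop := ∀ (sql : String) (error_position : Option Int) (context_lines : Int), Dom_get_sql_context_py sql error_position context_lines → Spec_get_sql_context_py sql error_position context_lines (get_sql_context_py sql error_position context_lines)
def Claim_exact_get_sql_context_py : Prop := ∀ (sql : String) (error_position : Option Int) (context_lines : Int), Dom_get_sql_context_py sql error_position context_lines → D_get_sql_context_py sql error_position context_lines → get_sql_context_py sql error_position context_lines ≠ get_sql_context_py_alt sql error_position context_lines
def Claim_changed_get_sql_context_py : Prop := Dom_get_sql_context_py (pvDiffWitness_get_sql_context_py.1) (pvDiffWitness_get_sql_context_py.2.1) (pvDiffWitness_get_sql_context_py.2.2) ∧ D_get_sql_context_py (pvDiffWitness_get_sql_context_py.1) (pvDiffWitness_get_sql_context_py.2.1) (pvDiffWitness_get_sql_context_py.2.2) ∧ get_sql_context_py (pvDiffWitness_get_sql_context_py.1) (pvDiffWitness_get_sql_context_py.2.1) (pvDiffWitness_get_sql_context_py.2.2) = pvDiffWitnessOut_get_sql_context_py.1 ∧ get_sql_context_py_alt (pvDiffWitness_get_sql_context_py.1) (pvDiffWitness_get_sql_context_py.2.1) (pvDiffWitness_get_sql_context_py.2.2)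 = pvDiffWitnessOut_get_sql_context_py.2 ∧ pvDiffWitnessOut_get_sql_context_py.1 ≠ pvDiffWitnessOut_get_sql_context_py.2

-- ===== LEMMAS AND PROOFS =====

def pvCsum : List (List Char) → Int → List Int
  | [], _ => []
  | l :: ls, t => (t + (l.length : Int) + 1) :: pvCsum ls (t + (l.length : Int) + 1)

theorem pvCsum_length (ls : List (List Char)) (t : Int) : (pvCsum ls t).length = ls.length := by
  induction ls generalizing t with
  | nil => rfl
  | cons l ls ih => simp [pvCsum, ih]

theorem pvCum_eq_csum (ls : List (List Char)) (acc : List Int) (t : Int) :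
    (ls.foldl (fun (p : List Int × Int) ln =>
        (p.1 ++ [p.2 + (ln.length : Int) + 1], p.2 + (ln.length : Int) + 1)) (acc, t)).1
      = acc ++ pvCsum ls t := by
  induction ls generalizing acc t with
  | nil => simp [pvCsum]
  | cons l ls ih => simp only [List.foldl_cons, pvCsum]; rw [ih]; simp

theorem pvCsum_get (ls : List (List Char)) (t : Int) (k : Nat) (hk : k < ls.length) :
    (pvCsum ls t)[k]'(by rw [pvCsum_length]; exact hk) =
      t + (((ls.take (k+1)).map (fun l => (l.length : Int) + 1)).sum) := by
  induction ls generalizing t k with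
  | nil => simp at hk
  | cons l ls ih =>
    cases k with
    | zero => simp [pvCsum]; ring
    | succ m =>
      simp only [pvCsum, List.getElem_cons_succ, List.take_succ_cons, List.map_cons, List.sum_cons]
      rw [ih _ _ (by simpa using hk)]
      ring

theorem pvCsum_mono (ls : List (List Char)) (t : Int) (i j : Nat) (hij : i ≤ j) (hj : j < ls.length) :
    (pvCsum ls t)[i]'(by rw [pvCsum_length]; omega) ≤ (pvCsum ls t)[j]'(by rw [pvCsum_length]; exact hj) := by
  rw [pvCsum_get ls t i (by omega), pvCsum_get ls t j hj]
  have key : ((ls.take (j+1)).map (fun l => (l.length : Int) + 1)).sum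
      = ((ls.take (i+1)).map (fun l => (l.length : Int) + 1)).sum
        + (((ls.drop (i+1)).take (j - i)).map (fun l => (l.length : Int) + 1)).sum := by
    conv_lhs => rw [show j + 1 = (i + 1) + (j - i) by omega, List.take_add]
    simp
  have hnn : 0 ≤ (List.map (fun l => (l.length : Int) + 1) ((ls.drop (i+1)).take (j - i))).sum := by
    apply List.sum_nonneg
    intro x hx
    obtain ⟨l, _, rfl⟩ := List.mem_map.mp hx
    positivity
  linarith

theorem pvFindLine_eq (ep : Int) (ls : List (List Char)) (s t : Int) :
    pvFindLine (PySem.List.enumerate ls s) t ep =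
      (if (pvCsum ls t).findIdx (fun c => decide (ep ≤ c)) < ls.length
       then s + ((pvCsum ls t).findIdx (fun c => decide (ep ≤ c)) : Int) else 0) := by
  induction ls generalizing s t with
  | nil => simp [PySem.List.enumerate, pvFindLine, pvCsum]
  | cons l ls ih =>
    rw [PySem.List.enumerate_cons]
    simp only [pvFindLine, pvCsum, List.findIdx_cons]
    by_cases h : ep ≤ t + (l.length : Int) + 1
    · simp [h, ge_iff_le]
    · have h2 : ¬ (t + (l.length : Int) + 1 ≥ ep) := by omega
      simp only [h2, if_false]
      rw [ih]
      simp only [decide_false]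
      by_cases h3 : (pvCsum ls (t + (l.length : Int) + 1)).findIdx (fun c => decide (ep ≤ c)) < ls.length
      · simp [h3, Nat.succ_lt_succ h3]
        ring
      · simp [h3]

theorem pvLowerBound_eq_base (cum : List Int) (ep : Int) (lo : Nat) (hlen : lo ≤ cum.length)
    (hleft : ∀ i : Nat, (h : i < cum.length) → i < lo → cum[i] < ep)
    (hright : ∀ i : Nat, (h : i < cum.length) → lo ≤ i → ep ≤ cum[i]) :
    lo = cum.findIdx (fun c => decide (ep ≤ c)) := by
  by_cases hl : lo < cum.length
  · exact ((List.findIdx_eq hl).mpr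
      ⟨by simpa using hright lo hl le_rfl, fun j hj => by simpa using hleft j (by omega) hj⟩).symm
  · have hleq : lo = cum.length := by omega
    subst hleq
    refine (List.findIdx_eq_length.mpr ?_).symm
    intro x hx
    obtain ⟨i, hi, rfl⟩ := List.mem_iff_getElem.mp hx
    simpa using (hleft i hi (by omega)).not_ge

theorem pvLowerBoundGo_eq (cum : List Int) (ep : Int)
    (mono : ∀ i j : Nat, (hij : i ≤ j) → (hj : j < cum.length) → cum[i]'(by omega) ≤ cum[j]) :
    ∀ (fuel lo hi : Nat), hi - lo ≤ fuel → lo ≤ hi → hi ≤ cum.length →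
    (∀ i : Nat, (h : i < cum.length) → i < lo → cum[i] < ep) →
    (∀ i : Nat, (h : i < cum.length) → hi ≤ i → ep ≤ cum[i]) →
    pvLowerBoundGo fuel cum ep lo hi = cum.findIdx (fun c => decide (ep ≤ c)) := by
  intro fuel
  induction fuel with
  | zero =>
    intro lo hi hfuel hle hlen hleft hright
    have hlohi : lo = hi := by omega
    subst hlohi
    exact pvLowerBound_eq_base cum ep lo hlen hleft hright
  | succ n ih =>
    intro lo hi hfuel hle hlen hleft hright
    rw [pvLowerBoundGo]
    by_cases hge : lo ≥ hi
    · rw [if_pos hge]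
      have hlohi : lo = hi := by omega
      subst hlohi
      exact pvLowerBound_eq_base cum ep lo hlen hleft hright
    · rw [if_neg hge]
      have hmid : (lo + hi) / 2 < cum.length := by omega
      by_cases hcond : PySem.List.pyGetD cum (((lo + hi) / 2 : Nat) : Int) 0 < ep
      · rw [if_pos hcond]
        rw [PySem.List.pyGetD_natCast, List.getD_eq_getElem _ _ hmid] at hcond
        apply ih ((lo + hi) / 2 + 1) hi (by omega) (by omega) hlen
        · intro i h hi2
          exact lt_of_le_of_lt (mono i ((lo + hi) / 2) (by omega) hmid) hcond
        · exact hright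
      · rw [if_neg hcond]
        rw [PySem.List.pyGetD_natCast, List.getD_eq_getElem _ _ hmid] at hcond
        apply ih lo ((lo + hi) / 2) (by omega) (by omega) (by omega) hleft
        intro i h hi2
        exact le_trans (le_of_not_gt hcond) (mono ((lo + hi) / 2) i hi2 h)

theorem pvLowerBound_eq (cum : List Int) (ep : Int)
    (mono : ∀ i j : Nat, (hij : i ≤ j) → (hj : j < cum.length) → cum[i]'(by omega) ≤ cum[j]) :
    pvLowerBound cum ep 0 cum.length = cum.findIdx (fun c => decide (ep ≤ c)) := by
  unfold pvLowerBound
  exact pvLowerBoundGo_eq cum ep mono _ 0 cum.length (by omega) (by omega) le_rfl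
    (fun i h hi => by omega) (fun i h hi => absurd h (by omega))

theorem pvSplitOnGo_len (fuel : Nat) :
    ∀ (l cur : List Char) (acc : List (List Char)), l.length < fuel →
      (PySem.Chars.splitOn.go ['\n'] fuel l cur acc).length = acc.length + l.count '\n' + 1 := by
  induction fuel with
  | zero => intro l cur acc h; omega
  | succ n ih =>
    intro l cur acc h
    cases l with
    | nil => simp [PySem.Chars.splitOn.go]
    | cons c rest =>
      rw [PySem.Chars.splitOn.go]
      by_cases hc : c = '\n'
      · subst hc
        rw [if_pos (by simp [List.isPrefixOf])]
        rw [ih _ _ _ (by simp at h ⊢; omega)]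
        simp
        omega
      · rw [if_neg (by simp [List.isPrefixOf]; exact fun he => hc he.symm)]
        rw [ih _ _ _ (by simp at h ⊢; omega)]
        simp [hc]

theorem pvSplitOnGo_sum (fuel : Nat) :
    ∀ (l cur : List Char) (acc : List (List Char)), l.length < fuel →
      ((PySem.Chars.splitOn.go ['\n'] fuel l cur acc).map (fun x => (x.length : Int) + 1)).sum
        = (acc.map (fun x => (x.length : Int) + 1)).sum + (cur.length : Int) + (l.length : Int) + 1 := by
  induction fuel with
  | zero => intro l cur acc h; omega
  | succ n ih =>
    intro l cur acc h
    cases l with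
    | nil =>
      simp [PySem.Chars.splitOn.go, List.sum_reverse]
      ring
    | cons c rest =>
      rw [PySem.Chars.splitOn.go]
      by_cases hc : c = '\n'
      · subst hc
        rw [if_pos (by simp [List.isPrefixOf])]
        rw [ih _ _ _ (by simp at h ⊢; omega)]
        simp
        ring
      · rw [if_neg (by simp [List.isPrefixOf]; exact fun he => hc he.symm)]
        rw [ih _ _ _ (by simp at h ⊢; omega)]
        simp
        ring

theorem pvSplitOn_length (cs : List Char) :
    (PySem.Chars.splitOn cs ['\n']).length = cs.count '\n' + 1 := by
  have := pvSplitOnGo_len (cs.length + 1) cs [] [] (by omega)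
  simpa [PySem.Chars.splitOn] using this

theorem pvSplitOn_sum (cs : List Char) :
    ((PySem.Chars.splitOn cs ['\n']).map (fun x => (x.length : Int) + 1)).sum = (cs.length : Int) + 1 := by
  have := pvSplitOnGo_sum (cs.length + 1) cs [] [] (by omega)
  simpa [PySem.Chars.splitOn] using this

theorem pvSplitOn_len_pos (cs : List Char) : 0 < (PySem.Chars.splitOn cs ['\n']).length := by
  rw [pvSplitOn_length]; omega

theorem pvFlatMap_if_not (xs : List Int) (el : Int) (row : Int → List Char) (m : Int → List Char)
    (hx : ∀ i ∈ xs, i ≠ el) :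
    xs.flatMap (fun i => [row i] ++ if i = el then [m i] else []) = xs.map row := by
  induction xs with
  | nil => rfl
  | cons a xs ih =>
    simp only [List.flatMap_cons, List.map_cons]
    rw [if_neg (hx a (by simp)), ih (fun i hi => hx i (by simp [hi]))]
    simp

theorem pvInsert_after_head {α : Type} (u v : List α) (a m : α) (p : Int)
    (hp : p = ((u.length + 1 : Nat) : Int)) :
    PySem.List.insert (u ++ a :: v) p m = u ++ a :: m :: v := by
  subst hp
  rw [PySem.List.insert_natCast _ _ _ (by simp)]
  rw [show u ++ a :: v = (u ++ [a]) ++ v by simp, show u.length + 1 = (u ++ [a]).length by simp,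
    List.take_left, List.drop_left]
  simp

def pvRow (lines : List (List Char)) (el : Int) (i : Int) : List Char :=
  (if i = el then ['→', ' '] else [' ', ' ']) ++ pvPad4 (i + 1) ++ [' ', '|', ' '] ++ PySem.List.pyGetD lines i []

def pvMark (lines : List (List Char)) (ep : Int) (i : Int) : List Char :=
  [' ',' ',' ',' ',' ',' ',' '] ++ PySem.List.pyRepeat [' ']
    (ep - (List.map (fun l => (l.length : Int) + 1) (PySem.List.slice lines none (some i))).sum) ++ ['^']

theorem pvMain (sql : String) (ep c : Int) (hep : ¬ ep = 0)
    (hnD : ¬ ('\n' ∈ sql.toList ∧ 0 ≤ c ∧ (sql.toList.length : Int) + 1 < ep)) :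
    get_sql_context_py sql (some ep) c = get_sql_context_py_alt sql (some ep) c := by
  unfold get_sql_context_py get_sql_context_py_alt
  simp only [hep, if_false]
  set lines := PySem.Chars.splitOn sql.toList ['\n'] with hlines
  have hn : 0 < lines.length := pvSplitOn_len_pos _
  rw [pvCum_eq_csum lines [] 0]
  simp only [List.nil_append]
  set cs := pvCsum lines 0 with hcs
  have hcslen : cs.length = lines.length := pvCsum_length _ _
  set K := cs.findIdx (fun x => decide (ep ≤ x)) with hK
  have hKle : K ≤ lines.length := hcslen ▸ List.findIdx_le_length
  have hlb : pvLowerBound cs ep 0 cs.length = K :=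
    pvLowerBound_eq cs ep (fun i j hij hj => pvCsum_mono lines 0 i j hij (by omega))
  simp only [hlb]
  set elN : Nat := min K (lines.length - 1) with helN
  have helNlt : elN < lines.length := by omega
  have hlast : (pvCsum lines 0)[lines.length - 1]'(by rw [pvCsum_length]; omega)
      = (sql.toList.length : Int) + 1 := by
    rw [pvCsum_get lines 0 (lines.length - 1) (by omega),
      show lines.length - 1 + 1 = lines.length by omega, List.take_length, hlines, pvSplitOn_sum]
    ring
  by_cases hcneg : c < 0
  · -- empty window on both sides: both return ""
    have hAempty : ∀ e : Int, PySem.List.pyRange (max 0 (e - c)) (min ((lines.length : Int)) (e + c + 1)) 1 = [] := by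
      intro e
      exact PySem.List.pyRange_one_eq_nil (by omega)
    rw [hAempty, hAempty]
    rw [if_neg (by rintro ⟨h1, h2⟩; omega)]
    simp
  have hc0 : 0 ≤ c := by omega
  have hA0 : (if K < lines.length then (0 : Int) + (K : Int) else 0) = (elN : Int) := by
    by_cases hKlt : K < lines.length
    · -- K < n: clamp is the identity
      rw [if_pos hKlt, helN]
      have : min K (lines.length - 1) = K := by omega
      rw [this]; ring
    · -- K = n: only possible when ep is past the end, excluded unless single-line
      have hKeq : K = lines.length := by omega
      rw [if_neg hKlt, helN, hKeq]
      have hone : lines.length = 1 := by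
        by_contra hmore
        -- more than one line means '\n' ∈ sql; with ep past the end that is D_
        have hcount : sql.toList.count '\n' ≥ 1 := by
          have := pvSplitOn_length sql.toList
          rw [← hlines] at this
          omega
        have hmem : '\n' ∈ sql.toList := List.count_pos_iff.mp (by omega)
        -- K = n means no prefix sum reaches ep, in particular the last one
        have hbig : (sql.toList.length : Int) + 1 < ep := by
          have hKcs : List.findIdx (fun x => decide (ep ≤ x)) cs = cs.length := by
            rw [← hK]; omega
          have hnone : ∀ x ∈ cs, decide (ep ≤ x) = false :=
            List.findIdx_eq_length.mp hKcs
          have hlastmem : (pvCsum lines 0)[lines.length - 1]'(by rw [pvCsum_length]; omega) ∈ cs := by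
            rw [hcs]; exact List.getElem_mem _
          have h2 := hnone _ hlastmem
          rw [hlast] at h2
          simp only [decide_eq_false_iff_not] at h2
          omega
        exact hnD ⟨hmem, hc0, hbig⟩
      rw [hone]; simp
  -- from here: identical window computation with error line elN on both sides
  have hA' : pvFindLine (PySem.List.enumerate lines 0) 0 ep = (elN : Int) := by
    rw [pvFindLine_eq, ← hcs, ← hK]
    exact hA0
  rw [hA']
  have hAfun : (fun (ctx : List (List Char)) (i : Int) =>
      if i = (elN : Int) then
        ctx ++ [(if i = (elN : Int) then ['→', ' '] else [' ', ' ']) ++ pvPad4 (i + 1) ++ [' ', '|', ' '] ++ PySem.List.pyGetD lines i []]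
            ++ [[' ',' ',' ',' ',' ',' ',' '] ++ PySem.List.pyRepeat [' '] (ep - (List.map (fun l => (l.length : Int) + 1) (PySem.List.slice lines none (some i))).sum) ++ ['^']]
      else
        ctx ++ [(if i = (elN : Int) then ['→', ' '] else [' ', ' ']) ++ pvPad4 (i + 1) ++ [' ', '|', ' '] ++ PySem.List.pyGetD lines i []])
      = (fun ctx i => ctx ++ ([pvRow lines (elN : Int) i] ++ if i = (elN : Int) then [pvMark lines ep i] else [])) := by
    funext ctx i
    by_cases h : i = (elN : Int) <;> simp [h, pvRow, pvMark]
  rw [hAfun, PySem.List.foldl_append_eq_flatMap]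
  have hBfun : (fun i => (if i = (elN : Int) then ['→', ' '] else [' ', ' ']) ++ pvPad4 (i + 1) ++ [' ', '|', ' '] ++ PySem.List.pyGetD lines i [])
      = pvRow lines (elN : Int) := by
    funext i; simp [pvRow]
  rw [hBfun]
  by_cases hord : max 0 ((elN : Int) - c) < min ((lines.length : Int)) ((elN : Int) + c + 1)
  · have h0el : (0 : Int) ≤ (elN : Int) := Int.natCast_nonneg _
    have helI : ((elN : Int)) < (lines.length : Int) := by exact_mod_cast helNlt
    have hin1 : max 0 ((elN : Int) - c) ≤ (elN : Int) := by omega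
    have hin2 : (elN : Int) < min ((lines.length : Int)) ((elN : Int) + c + 1) := by omega
    rw [if_pos ⟨hin1, hin2⟩]
    have hsplit : PySem.List.pyRange (max 0 ((elN : Int) - c)) (min ((lines.length : Int)) ((elN : Int) + c + 1))
        = PySem.List.pyRange (max 0 ((elN : Int) - c)) ((elN : Int))
          ++ ((elN : Int)) :: PySem.List.pyRange ((elN : Int) + 1) (min ((lines.length : Int)) ((elN : Int) + c + 1)) := by
      rw [PySem.List.pyRange_one_append (max 0 ((elN : Int) - c)) ((elN : Int)) _ hin1 (by omega),
        PySem.List.pyRange_one_cons hin2]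
    rw [hsplit]
    rw [List.flatMap_append, List.flatMap_cons, List.map_append, List.map_cons]
    rw [pvFlatMap_if_not _ _ _ _ (fun i hi => by have := PySem.List.mem_pyRange_one.mp hi; omega)]
    rw [pvFlatMap_if_not _ _ _ _ (fun i hi => by have := PySem.List.mem_pyRange_one.mp hi; omega)]
    rw [pvInsert_after_head _ _ _ _ _
      (by rw [List.length_map, PySem.List.length_pyRange_one, Nat.cast_add, Nat.cast_one,
            Int.toNat_of_nonneg (by omega)])]
    have hsum : (List.map (fun l => (l.length : Int) + 1) (PySem.List.slice lines none (some (elN : Int)))).sum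
        = (if ((elN : Int)) > 0 then PySem.List.pyGetD cs ((elN : Int) - 1) 0 else 0) := by
      rw [PySem.List.slice_to lines h0el]
      rcases Nat.eq_zero_or_pos elN with h0 | hpos
      · rw [h0]; simp
      · rw [if_pos (by exact_mod_cast hpos)]
        have hm1 : ((elN : Int) - 1) = ((elN - 1 : Nat) : Int) := by omega
        rw [hm1, PySem.List.pyGetD_natCast, hcs,
          List.getD_eq_getElem _ _ (show elN - 1 < (pvCsum lines 0).length by rw [pvCsum_length]; omega)]
        rw [pvCsum_get lines 0 (elN - 1) (by omega)]
        rw [Nat.sub_add_cancel hpos]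
        simp
    have hmm : pvMark lines ep (elN : Int)
        = [' ',' ',' ',' ',' ',' ',' '] ++ PySem.List.pyRepeat [' ']
            (ep - if ((elN : Int)) > 0 then PySem.List.pyGetD cs ((elN : Int) - 1) 0 else 0) ++ ['^'] := by
      simp only [pvMark, hsum]
    simp [hmm]
  · rw [PySem.List.pyRange_one_eq_nil (by omega)]
    rw [if_neg (by rintro ⟨h1, h2⟩; exact hord (by omega))]
    simp


-- ----- lemmas for the tightness theorem (A ≠ B everywhere inside D_) -----

theorem pvRepeat_sp (k : Int) : PySem.List.pyRepeat [' '] k = List.replicate k.toNat ' ' := by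
  unfold PySem.List.pyRepeat
  generalize k.toNat = m
  induction m with
  | zero => simp
  | succ m ih =>
    simp only [List.replicate_succ, List.flatten_cons, List.singleton_append]
    rw [ih]

theorem pvIdxNl (k : Nat) (ys : List Char) :
    List.idxOf '\n' ('^' :: (List.replicate k ' ' ++ '\n' :: ys)) = k + 1 := by
  induction k with
  | zero =>
    simp only [List.replicate_zero, List.nil_append]
    rw [List.idxOf_cons_ne _ (by decide : '^' ≠ '\n'), List.idxOf_cons_self]
  | succ m ih =>
    rw [List.replicate_succ, List.cons_append,
      List.idxOf_cons_ne _ (by decide : '^' ≠ '\n'),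
      List.idxOf_cons_ne _ (by decide : ' ' ≠ '\n')]
    rw [List.idxOf_cons_ne _ (by decide : '^' ≠ '\n')] at ih
    omega

theorem pvRevIdx (row m : List Char) (k : Nat)
    (hm : m = [' ',' ',' ',' ',' ',' ',' '] ++ List.replicate k ' ' ++ ['^']) :
    List.idxOf '\n' ((row ++ ['\n'] ++ m).reverse) = k + 8 := by
  subst hm
  have hshape : (row ++ ['\n'] ++ ([' ',' ',' ',' ',' ',' ',' '] ++ List.replicate k ' ' ++ ['^'])).reverse
      = '^' :: (List.replicate (k + 7) ' ' ++ '\n' :: row.reverse) := by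
    rw [show ([' ',' ',' ',' ',' ',' ',' '] : List Char) = List.replicate 7 ' ' from rfl]
    simp [List.reverse_append, List.replicate_add]
  rw [hshape, pvIdxNl]

theorem pvJoinHead (sep x : List Char) (l : List (List Char)) (ch : Char)
    (h : x.head? = some ch) : (PySem.Chars.join sep (x :: l)).head? = some ch := by
  cases l with
  | nil => rw [PySem.Chars.join_singleton]; exact h
  | cons y t =>
    rw [PySem.Chars.join_cons_cons]
    cases x with
    | nil => simp at h
    | cons a xs => simp at h ⊢; simpa using h

theorem pvJoinHeadNe (sep x y : List Char) (lx ly : List (List Char)) (cx cy : Char)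
    (hx : x.head? = some cx) (hy : y.head? = some cy) (hne : cx ≠ cy) :
    PySem.Chars.join sep (x :: lx) ≠ PySem.Chars.join sep (y :: ly) := by
  intro h
  have h2 := congrArg List.head? h
  rw [pvJoinHead sep x lx cx hx, pvJoinHead sep y ly cy hy] at h2
  exact hne (Option.some.inj h2)

theorem pvSum_one_le (l : List Int) (h1 : ∀ x ∈ l, 1 ≤ x) (h2 : l ≠ []) : 1 ≤ l.sum := by
  cases l with
  | nil => exact absurd rfl h2
  | cons a t =>
    have ha : 1 ≤ a := h1 a (by simp)
    have ht : 0 ≤ t.sum := List.sum_nonneg (fun x hx => le_trans (by norm_num) (h1 x (by simp [hx])))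
    simp only [List.sum_cons]
    omega

theorem pvTight (sql : String) (ep c : Int)
    (hmem : '\n' ∈ sql.toList) (hc0 : 0 ≤ c) (hbig : (sql.toList.length : Int) + 1 < ep) :
    get_sql_context_py sql (some ep) c ≠ get_sql_context_py_alt sql (some ep) c := by
  have hlen0 : (0 : Int) ≤ (sql.toList.length : Int) := Int.natCast_nonneg _
  have hep : ¬ ep = 0 := by omega
  unfold get_sql_context_py get_sql_context_py_alt
  simp only [hep, if_false]
  set lines := PySem.Chars.splitOn sql.toList ['\n'] with hlines
  have hn : 0 < lines.length := pvSplitOn_len_pos _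
  have hn2 : 2 ≤ lines.length := by
    have hcpos : 0 < sql.toList.count '\n' := List.count_pos_iff.mpr hmem
    have := pvSplitOn_length sql.toList
    rw [← hlines] at this
    omega
  rw [pvCum_eq_csum lines [] 0]
  simp only [List.nil_append]
  set cs := pvCsum lines 0 with hcs
  have hcslen : cs.length = lines.length := pvCsum_length _ _
  set K := cs.findIdx (fun x => decide (ep ≤ x)) with hK
  have hlast : (pvCsum lines 0)[lines.length - 1]'(by rw [pvCsum_length]; omega)
      = (sql.toList.length : Int) + 1 := by
    rw [pvCsum_get lines 0 (lines.length - 1) (by omega),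
      show lines.length - 1 + 1 = lines.length by omega, List.take_length, hlines, pvSplitOn_sum]
    ring
  have hKcs : List.findIdx (fun x => decide (ep ≤ x)) cs = cs.length := by
    refine List.findIdx_eq_length.mpr ?_
    intro x hx
    obtain ⟨i, hi, rfl⟩ := List.mem_iff_getElem.mp hx
    have h2 := pvCsum_mono lines 0 i (lines.length - 1) (by omega) (by omega)
    rw [hlast] at h2
    simp only [decide_eq_false_iff_not]
    have h3 : (pvCsum lines 0)[i]'(by rw [pvCsum_length]; omega) = cs[i] := rfl
    rw [h3] at h2
    omega
  have hKeq : K = lines.length := by rw [hK, hKcs, hcslen]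
  have hlb : pvLowerBound cs ep 0 cs.length = K :=
    pvLowerBound_eq cs ep (fun i j hij hj => pvCsum_mono lines 0 i j hij (by omega))
  simp only [hlb]
  have hminK : min K (lines.length - 1) = lines.length - 1 := by omega
  simp only [hminK]
  have hA' : pvFindLine (PySem.List.enumerate lines 0) 0 ep = 0 := by
    rw [pvFindLine_eq, ← hcs, ← hK, hKeq]
    simp
  rw [hA']
  -- A's loop as a flatMap of rows with the marker after the arrow row
  have hAfun : (fun (ctx : List (List Char)) (i : Int) =>
      if i = (0 : Int) then
        ctx ++ [(if i = (0 : Int) then ['→', ' '] else [' ', ' ']) ++ pvPad4 (i + 1) ++ [' ', '|', ' '] ++ PySem.List.pyGetD lines i []]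
            ++ [[' ',' ',' ',' ',' ',' ',' '] ++ PySem.List.pyRepeat [' '] (ep - (List.map (fun l => (l.length : Int) + 1) (PySem.List.slice lines none (some i))).sum) ++ ['^']]
      else
        ctx ++ [(if i = (0 : Int) then ['→', ' '] else [' ', ' ']) ++ pvPad4 (i + 1) ++ [' ', '|', ' '] ++ PySem.List.pyGetD lines i []])
      = (fun ctx i => ctx ++ ([pvRow lines 0 i] ++ if i = (0 : Int) then [pvMark lines ep i] else [])) := by
    funext ctx i
    by_cases h : i = (0 : Int) <;> simp [h, pvRow, pvMark]
  rw [hAfun, PySem.List.foldl_append_eq_flatMap]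
  have hBfun : (fun i => (if i = ((lines.length - 1 : Nat) : Int) then ['→', ' '] else [' ', ' ']) ++ pvPad4 (i + 1) ++ [' ', '|', ' '] ++ PySem.List.pyGetD lines i [])
      = pvRow lines ((lines.length - 1 : Nat) : Int) := by
    funext i; simp [pvRow]
  rw [hBfun]
  set eB : Int := ((lines.length - 1 : Nat) : Int) with heB
  have heB1 : eB = (lines.length : Int) - 1 := by rw [heB]; omega
  have hA0max : max 0 ((0 : Int) - c) = 0 := by omega
  rw [hA0max]
  rw [PySem.List.pyRange_one_cons (by omega)]
  rw [List.flatMap_cons]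
  rw [if_pos rfl]
  -- A's marker in explicit replicate form
  have hMA : pvMark lines ep 0 = [' ',' ',' ',' ',' ',' ',' '] ++ List.replicate ep.toNat ' ' ++ ['^'] := by
    rw [pvMark, PySem.List.slice_to lines le_rfl]
    simp
  -- B's window contains the last line
  have hin1 : max 0 (eB - c) ≤ eB := by omega
  have hin2 : eB < min ((lines.length : Int)) (eB + c + 1) := by omega
  rw [if_pos ⟨hin1, hin2⟩]
  have hsplit : PySem.List.pyRange (max 0 (eB - c)) (min ((lines.length : Int)) (eB + c + 1))
      = PySem.List.pyRange (max 0 (eB - c)) eB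
        ++ eB :: PySem.List.pyRange (eB + 1) (min ((lines.length : Int)) (eB + c + 1)) := by
    rw [PySem.List.pyRange_one_append (max 0 (eB - c)) eB _ hin1 (by omega),
      PySem.List.pyRange_one_cons hin2]
  rw [hsplit, List.map_append, List.map_cons]
  rw [pvInsert_after_head _ _ _ _ _
    (by rw [List.length_map, PySem.List.length_pyRange_one, Nat.cast_add, Nat.cast_one,
          Int.toNat_of_nonneg (by omega)])]
  have hq1 : (1 : Int) ≤ cs[lines.length - 2]'(by omega) := by
    have h4 : (pvCsum lines 0)[lines.length - 2]'(by rw [pvCsum_length]; omega)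
        = 0 + (((lines.take (lines.length - 2 + 1)).map (fun l => (l.length : Int) + 1)).sum) :=
      pvCsum_get lines 0 (lines.length - 2) (by omega)
    have h5 : (1 : Int) ≤ ((lines.take (lines.length - 2 + 1)).map (fun l => (l.length : Int) + 1)).sum := by
      refine pvSum_one_le _ ?_ ?_
      · intro x hx
        obtain ⟨l, _, rfl⟩ := List.mem_map.mp hx
        have : (0 : Int) ≤ (l.length : Int) := Int.natCast_nonneg _
        omega
      · have hne : lines ≠ [] := by intro h0; rw [h0] at hn; simp at hn
        simp only [ne_eq, List.map_eq_nil_iff, List.take_eq_nil_iff, not_or]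
        exact ⟨by omega, hne⟩
    have h6 : (pvCsum lines 0)[lines.length - 2]'(by rw [pvCsum_length]; omega)
        = cs[lines.length - 2]'(by omega) := rfl
    rw [h6] at h4
    omega
  have hMB : (ep - if eB > 0 then PySem.List.pyGetD cs (eB - 1) 0 else 0)
      = ep - cs[lines.length - 2]'(by omega) := by
    rw [if_pos (by omega)]
    have hm1 : eB - 1 = ((lines.length - 2 : Nat) : Int) := by omega
    rw [hm1, PySem.List.pyGetD_natCast, List.getD_eq_getElem _ _ (by omega)]
  rw [hMB]
  -- now compare the two outputs
  intro hout
  have hlists := congrArg String.toList hout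
  simp only [String.toList_ofList] at hlists
  by_cases hc1 : 1 ≤ c
  · -- B's window starts strictly before the arrow line: first characters '→' vs ' '
    have hlow : max 0 (eB - c) < eB := by omega
    rw [PySem.List.pyRange_one_cons hlow, List.map_cons] at hlists
    rw [show pvRow lines eB (max 0 (eB - c)) = [' ', ' '] ++ pvPad4 (max 0 (eB - c) + 1) ++ [' ', '|', ' '] ++ PySem.List.pyGetD lines (max 0 (eB - c)) []
        from by rw [pvRow, if_neg (by omega)]] at hlists
    rw [show pvRow lines 0 0 = ['→', ' '] ++ pvPad4 (0 + 1) ++ [' ', '|', ' '] ++ PySem.List.pyGetD lines 0 []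
        from by rw [pvRow, if_pos rfl]] at hlists
    simp only [List.nil_append, List.cons_append] at hlists
    exact pvJoinHeadNe _ _ _ _ _ '→' ' ' (by simp) (by simp) (by decide) hlists
  · -- c = 0: both outputs are exactly [arrow row, marker row]; markers have different lengths
    have hc00 : c = 0 := by omega
    subst hc00
    have hAend : min ((lines.length : Int)) ((0 : Int) + 0 + 1) = 1 := by omega
    rw [hAend] at hlists
    rw [show PySem.List.pyRange ((0 : Int) + 1) 1 1 = [] from PySem.List.pyRange_one_eq_nil (by omega)] at hlists
    have hBlow : max 0 (eB - 0) = eB := by omega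
    rw [hBlow] at hlists
    rw [show PySem.List.pyRange eB eB 1 = [] from PySem.List.pyRange_one_eq_nil (by omega)] at hlists
    rw [show min ((lines.length : Int)) (eB + 0 + 1) = eB + 1 from by omega] at hlists
    rw [show PySem.List.pyRange (eB + 1) (eB + 1) 1 = [] from PySem.List.pyRange_one_eq_nil (by omega)] at hlists
    rw [hMA, pvRepeat_sp] at hlists
    simp only [List.flatMap_nil, List.append_nil, List.map_nil, List.nil_append,
      List.singleton_append] at hlists
    rw [PySem.Chars.join_cons_cons, PySem.Chars.join_singleton,
      PySem.Chars.join_cons_cons, PySem.Chars.join_singleton] at hlists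
    have hidx := congrArg (fun l => List.idxOf '\n' l.reverse) hlists
    dsimp only at hidx
    rw [pvRevIdx _ _ ep.toNat rfl, pvRevIdx _ _ (ep - cs[lines.length - 2]'(by omega)).toNat rfl] at hidx
    omega

-- ===== VERDICT (by name: the statement is the Claim_ definition above) =====
theorem get_sql_context_py_spec : Claim_unchanged_get_sql_context_py := by
  intro sql error_position context_lines _
  unfold Spec_get_sql_context_py
  intro hnD
  cases error_position with
  | none => rfl
  | some ep =>
    by_cases hep : ep = 0
    · subst hep; rfl
    · refine pvMain sql ep context_lines hep ?_
      intro ⟨h1, h2, h3⟩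
      exact hnD ⟨h1, h2, by simpa using h3⟩

theorem get_sql_context_py_changed : Claim_changed_get_sql_context_py := by
  unfold Claim_changed_get_sql_context_py; decide

theorem get_sql_context_py_tight : Claim_exact_get_sql_context_py := by
  intro sql error_position context_lines _ hD
  obtain ⟨hmem, hc0, hbig⟩ := hD
  cases error_position with
  | none =>
    exfalso
    simp only [Option.getD_none] at hbig
    have : (0 : Int) ≤ (sql.toList.length : Int) := Int.natCast_nonneg _
    omega
  | some ep =>
    simp only [Option.getD_some] at hbig
    exact pvTight sql ep context_lines hmem hc0 hbig
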